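-- pv_equiv track=rewrite | github.com/PiJoules/Operator-number-system | main.py | decimal_to_nos
-- ===== SOURCE A (Python) =====
-- from itertools import product
--
-- def nos_to_decimal(nos):
--     assert isinstance(nos, str)
--     n = len(nos)
--     result = 0
--     for i in range(n):
--         c = nos[i]
--         if c == "0":
--             result += i + 1
--         elif c == "1":
--             result -= i + 1
--         elif c == "2":
--             result *= i + 1
--         else:
--             raise RuntimeError(
--                 "Unknown char: {}. Expected 0, 1, or 2.".format(c))
--     return result
--
-- def decimal_to_nos(num):
--     i = 1
--     valid = []
--     while not valid:
--         combos = product("012", repeat=i)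
--         for combo in combos:
--             combo = "".join(combo)
--             dec = nos_to_decimal(combo)
--             if dec == num:
--                 valid.append(combo)
--         i += 1
--
--     return max(valid, key=lambda x: x.count("0"))
-- ===== SOURCE B (Python) =====
-- def decimal_to_nos(num):
--     # Level-by-level dynamic programming over reachable values: for each value keep
--     # the best prefix (most zeros, then lexicographically smallest); the first level
--     # whose table contains num yields the answer.
--     level = {0: (0, "")}  # value -> (zero_count, prefix), all prefixes same length
--     while True:
--         nxt = {}
--         for val, (z, s) in level.items():
--             i = len(s) + 1
--             for c, v2 in (("0", val + i), ("1", val - i), ("2", val * i)):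
--                 cand = (z + (c == "0"), s + c)
--                 cur = nxt.get(v2)
--                 if cur is None or cand[0] > cur[0] or (cand[0] == cur[0] and cand[1] < cur[1]):
--                     nxt[v2] = cand
--         level = nxt
--         if num in level:
--             return level[num][1]
-- ===== Notes on version B (the rewrite author's own statement) =====
-- stated objective: faster
-- what changed: Replaces A's per-length brute-force enumeration of all 3^L operator strings (each re-evaluated from scratch, then max by zero-count) with a level-by-level dynamic programme over reachable values that keeps, per value, only the best prefix (most zeros, then lexicographically smallest) and answers at the first level containing num.
import Mathlib
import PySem

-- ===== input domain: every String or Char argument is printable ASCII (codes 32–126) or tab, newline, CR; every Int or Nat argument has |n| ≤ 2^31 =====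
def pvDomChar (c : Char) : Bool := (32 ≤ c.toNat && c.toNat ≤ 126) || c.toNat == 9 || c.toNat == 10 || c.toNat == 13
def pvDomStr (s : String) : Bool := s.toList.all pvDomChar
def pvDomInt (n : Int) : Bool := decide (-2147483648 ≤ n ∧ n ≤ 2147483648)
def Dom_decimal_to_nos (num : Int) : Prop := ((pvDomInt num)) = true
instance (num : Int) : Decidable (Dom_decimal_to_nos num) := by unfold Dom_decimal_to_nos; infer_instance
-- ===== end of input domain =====

-- B replaces A's brute-force enumeration of all 3^L operator strings per length with a
-- level-by-level DP over reachable values keeping the best (most-zeros, lex-least) prefix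
-- per value (objective: faster).

-- ===== PORT A =====
-- nos_to_decimal, on List Char; the 'else: raise' branch is unreachable for the "012"
-- combos decimal_to_nos generates, so it is not modelled (the helper is only applied to those).

-- one iteration of the for-loop of nos_to_decimal (char at index i contributes with factor i+1)
def pvEvalStep (res : Int) (ic : Int × Char) : Int :=
  if ic.2 = '0' then res + (ic.1 + 1)
  else if ic.2 = '1' then res - (ic.1 + 1)
  else res * (ic.1 + 1)


-- nos_to_decimal on the combo as a char list
def pvEval (l : List Char) : Int := (PySem.List.enumerate l).foldl pvEvalStep 0


-- product("012", repeat=i): all length-i strings over "012" in lexicographic order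
def pvCombos : Nat → List (List Char)
  | 0 => [[]]
  | n + 1 => (pvCombos n).flatMap (fun s => ['0', '1', '2'].map (fun c => s ++ [c]))


-- the while-loop of A; fuel |num|+1 levels always suffice (for every target value some
-- combo of length at most max(|num|,1) evaluates to it), so the 0-fuel branch never
-- fires and only makes the recursion structural
def pvLoopA (num : Int) : Nat → Nat → List (List Char)
  | _, 0 => []
  | i, fuel + 1 =>
    let valid := (pvCombos i).filter (fun s => pvEval s == num)
    if valid.isEmpty then pvLoopA num (i + 1) fuel else valid



def decimal_to_nos (num : Int) : String :=
  match PySem.List.max? (pvLoopA num 1 (num.natAbs + 1)) (fun s => s.count '0') with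
  | some m => String.ofList m
  | none => ""


-- ===== PORT B =====

-- Python string "<" on the char lists (lexicographic by code point)
def pvLexLt : List Char → List Char → Bool
  | [], [] => false
  | [], _ :: _ => true
  | _ :: _, [] => false
  | a :: s, b :: t => if a < b then true else if b < a then false else pvLexLt s t


-- the strict comparison of B: more zeros, or equally many zeros and lex-smaller
def pvBetter (p q : Int × List Char) : Bool :=
  p.1 > q.1 || (p.1 == q.1 && pvLexLt p.2 q.2)


-- 'cur = nxt.get(v2); if cur is None or ...better...: nxt[v2] = cand'
def pvRelax (nxt : PySem.Dict Int (Int × List Char)) (kc : Int × (Int × List Char)) :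
    PySem.Dict Int (Int × List Char) :=
  match nxt.get? kc.1 with
  | none => nxt.insert kc.1 kc.2
  | some cur => if pvBetter kc.2 cur then nxt.insert kc.1 kc.2 else nxt


-- one iteration of the while-body: build nxt from level
def pvStep (level : PySem.Dict Int (Int × List Char)) : PySem.Dict Int (Int × List Char) :=
  level.items.foldl
    (fun nxt p =>
      let i : Int := (p.2.2.length : Int) + 1
      [('0', p.1 + i), ('1', p.1 - i), ('2', p.1 * i)].foldl
        (fun nxt cv =>
          pvRelax nxt (cv.2, (p.2.1 + (if cv.1 = '0' then 1 else 0), p.2.2 ++ [cv.1])))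
        nxt)
    PySem.Dict.empty


-- the while True loop of B; same fuel bound as in the port of A, never exhausted
def pvLoopB (num : Int) : PySem.Dict Int (Int × List Char) → Nat → Option (List Char)
  | _, 0 => none
  | level, fuel + 1 =>
    let nl := pvStep level
    match nl.get? num with
    | some zs => some zs.2
    | none => pvLoopB num nl fuel



def decimal_to_nos_alt (num : Int) : String :=
  match pvLoopB num (PySem.Dict.ofList [(0, (0, []))]) (num.natAbs + 1) with
  | some s => String.ofList s
  | none => ""


-- ===== PRECONDITION & SPEC =====
def Spec_decimal_to_nos (num : Int) (out : String) : Prop := out = decimal_to_nos_alt num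
instance (num : Int) (out : String) : Decidable (Spec_decimal_to_nos num out) := by unfold Spec_decimal_to_nos; infer_instance

-- ===== CLAIM (what is proved, stated in full; the proofs are below) =====
def Claim_equal_decimal_to_nos : Prop := ∀ (num : Int), Dom_decimal_to_nos num → Spec_decimal_to_nos num (decimal_to_nos num)

-- ===== LEMMAS AND PROOFS =====

def pvKey (s : List Char) : Nat := s.count '0'


def pvIsBest (l : List (List Char)) (m : List Char) : Prop :=
  m ∈ l ∧ ∀ x ∈ l, x = m ∨ pvBetter ((m.count '0' : Int), m) ((x.count '0' : Int), x) = true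


def pvFilt (v : Int) (i : Nat) : List (List Char) :=
  (pvCombos i).filter (fun s => pvEval s == v)


def pvDictOK (i : Nat) (d : PySem.Dict Int (Int × List Char)) : Prop :=
  d.keys.Nodup ∧
  ∀ v : Int, match d.get? v with
    | none => pvFilt v i = []
    | some (z, s) => z = (s.count '0' : Int) ∧ pvIsBest (pvFilt v i) s


def pvBestFrom (o : Option (Int × List Char)) (l : List (Int × List Char)) :
    Option (Int × List Char) :=
  l.foldl (fun o p => match o with
    | none => some p
    | some q => if pvBetter p q then some p else some q) o


def pvCands (p : Int × (Int × List Char)) : List (Int × (Int × List Char)) :=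
  [('0', p.1 + ((p.2.2.length : Int) + 1)), ('1', p.1 - ((p.2.2.length : Int) + 1)),
   ('2', p.1 * ((p.2.2.length : Int) + 1))].map
    (fun cv => (cv.2, (p.2.1 + (if cv.1 = '0' then 1 else 0), p.2.2 ++ [cv.1])))


def pvCandKey (k : Int) (s : List Char) (c : Char) : Int :=
  if c = '0' then k + ((s.length : Int) + 1)
  else if c = '1' then k - ((s.length : Int) + 1)
  else k * ((s.length : Int) + 1)


lemma pvLexLt_trichotomy (s t : List Char) : pvLexLt s t = true ∨ pvLexLt t s = true ∨ s = t := by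
  induction s generalizing t with
  | nil => cases t <;> simp [pvLexLt]
  | cons a s ih =>
    cases t with
    | nil => simp [pvLexLt]
    | cons b t =>
      rcases lt_trichotomy a b with h | h | h
      · left; simp [pvLexLt, h]
      · subst h
        rcases ih t with h2 | h2 | h2 <;> simp [pvLexLt, h2]
      · right; left; simp [pvLexLt, h]


lemma pvLexLt_asymm {s t : List Char} (h : pvLexLt s t = true) : pvLexLt t s = false := by
  induction s generalizing t with
  | nil => cases t <;> simp_all [pvLexLt]
  | cons a s ih =>
    cases t with
    | nil => simp_all [pvLexLt]
    | cons b t =>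
      simp only [pvLexLt] at h ⊢
      rcases lt_trichotomy a b with h1 | h1 | h1
      · simp [h1, not_lt_of_gt h1]
      · subst h1; simp only [lt_irrefl, if_false] at h ⊢; exact ih h
      · simp [h1, not_lt_of_gt h1] at h


lemma pvLexLt_trans {s t u : List Char} (h1 : pvLexLt s t = true) (h2 : pvLexLt t u = true) :
    pvLexLt s u = true := by
  induction s generalizing t u with
  | nil =>
    cases t with
    | nil => simp_all [pvLexLt]
    | cons b t => cases u <;> simp_all [pvLexLt]
  | cons a s ih =>
    cases t with
    | nil => simp_all [pvLexLt]
    | cons b t =>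
      cases u with
      | nil => simp_all [pvLexLt]
      | cons c u =>
        simp only [pvLexLt] at h1 h2 ⊢
        rcases lt_trichotomy a b with hab | hab | hab
        · rcases lt_trichotomy b c with hbc | hbc | hbc
          · simp [lt_trans hab hbc]
          · subst hbc; simp [hab]
          · simp [not_lt_of_gt hbc, hbc] at h2
        · subst hab
          rcases lt_trichotomy a c with hbc | hbc | hbc
          · simp [hbc]
          · subst hbc
            simp only [lt_irrefl, if_false] at h1 h2 ⊢
            exact ih h1 h2
          · simp [not_lt_of_gt hbc, hbc] at h2
        · simp [not_lt_of_gt hab, hab] at h1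


lemma pvLexLt_append (s t : List Char) (c d : Char) (h : s.length = t.length) :
    pvLexLt (s ++ [c]) (t ++ [d]) = (pvLexLt s t || (s == t && decide (c < d))) := by
  induction s generalizing t with
  | nil => cases t with
    | nil => simp [pvLexLt]
    | cons b t => simp at h
  | cons a s ih =>
    cases t with
    | nil => simp at h
    | cons b t =>
      simp only [List.cons_append, pvLexLt]
      by_cases h1 : a < b
      · simp [h1]
      · by_cases h2 : b < a
        · simp [h1, h2]
          intro hab; exact absurd hab (ne_of_gt h2)
        · have : a = b := le_antisymm (not_lt.mp h2) (not_lt.mp h1)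
          subst this
          simp only [List.length_cons] at h
          simp [ih t (by omega)]


lemma pvBetter_trichotomy (p q : Int × List Char) :
    pvBetter p q = true ∨ pvBetter q p = true ∨ p = q := by
  obtain ⟨z1, s1⟩ := p; obtain ⟨z2, s2⟩ := q
  rcases lt_trichotomy z1 z2 with h | h | h
  · right; left; simp [pvBetter, h]
  · subst h
    rcases pvLexLt_trichotomy s1 s2 with h2 | h2 | h2
    · left; simp [pvBetter, h2]
    · right; left; simp [pvBetter, h2]
    · right; right; simp [h2]
  · left; simp [pvBetter, h]


lemma pvBetter_trans {p q r : Int × List Char} (h1 : pvBetter p q = true)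
    (h2 : pvBetter q r = true) : pvBetter p r = true := by
  obtain ⟨z1, s1⟩ := p; obtain ⟨z2, s2⟩ := q; obtain ⟨z3, s3⟩ := r
  simp only [pvBetter, Bool.or_eq_true, Bool.and_eq_true, beq_iff_eq, decide_eq_true_eq,
    gt_iff_lt] at h1 h2 ⊢
  rcases h1 with h1 | ⟨h1, h1'⟩ <;> rcases h2 with h2 | ⟨h2, h2'⟩
  · left; omega
  · left; omega
  · left; omega
  · right; exact ⟨by omega, pvLexLt_trans h1' h2'⟩


lemma pvBetter_asymm {p q : Int × List Char} (h : pvBetter p q = true) : pvBetter q p = false := by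
  obtain ⟨z1, s1⟩ := p; obtain ⟨z2, s2⟩ := q
  simp only [pvBetter, Bool.or_eq_true, Bool.and_eq_true, beq_iff_eq, decide_eq_true_eq,
    gt_iff_lt, Bool.or_eq_false_iff, Bool.and_eq_false_iff] at h ⊢
  rcases h with h | ⟨h, h'⟩
  · constructor
    · simp; omega
    · left; simp; omega
  · exact ⟨by simp; omega, Or.inr (pvLexLt_asymm h')⟩


lemma pvIsBest_unique {l : List (List Char)} {m m' : List Char}
    (h : pvIsBest l m) (h' : pvIsBest l m') : m = m' := by
  obtain ⟨hm, hb⟩ := h; obtain ⟨hm', hb'⟩ := h'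
  rcases hb m' hm' with h1 | h1
  · exact h1.symm
  · rcases hb' m hm with h2 | h2
    · exact h2
    · have := pvBetter_asymm h1
      rw [this] at h2; cases h2


lemma pvEval_append (s : List Char) (c : Char) :
    pvEval (s ++ [c]) = pvEvalStep (pvEval s) ((s.length : Int), c) := by
  unfold pvEval
  rw [PySem.List.enumerate_append, List.foldl_append]
  simp [PySem.List.enumerate]


lemma pvCombos_length {n : Nat} {s : List Char} (h : s ∈ pvCombos n) : s.length = n := by
  induction n generalizing s with
  | zero => simp [pvCombos] at h; simp [h]
  | succ n ih =>
    simp only [pvCombos, List.mem_flatMap, List.mem_map] at h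
    obtain ⟨t, ht, c, _, rfl⟩ := h
    simp [ih ht]


lemma pvCombos_mem_succ {n : Nat} {x : List Char} :
    x ∈ pvCombos (n + 1) ↔ ∃ t ∈ pvCombos n, ∃ c ∈ (['0', '1', '2'] : List Char), x = t ++ [c] := by
  simp only [pvCombos, List.mem_flatMap, List.mem_map]
  constructor
  · rintro ⟨t, ht, c, hc, rfl⟩; exact ⟨t, ht, c, hc, rfl⟩
  · rintro ⟨t, ht, c, hc, rfl⟩; exact ⟨t, ht, c, hc, rfl⟩


lemma pvCombos_pairwise (n : Nat) : (pvCombos n).Pairwise (fun s t => pvLexLt s t = true) := by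
  induction n with
  | zero => simp [pvCombos]
  | succ n ih =>
    rw [pvCombos, List.pairwise_flatMap]
    constructor
    · intro t _
      rw [List.pairwise_map]
      have h3 : List.Pairwise (fun c d : Char => c < d) ['0', '1', '2'] := by decide
      refine h3.imp ?_
      intro c d h
      rw [pvLexLt_append t t c d rfl]
      simp [h]
    · refine List.Pairwise.imp_of_mem ?_ ih
      intro s t hs ht h x hx y hy
      simp only [List.mem_map] at hx hy
      obtain ⟨c, _, rfl⟩ := hx; obtain ⟨d, _, rfl⟩ := hy
      rw [pvLexLt_append s t c d (by rw [pvCombos_length hs, pvCombos_length ht])]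
      simp [h]


lemma pvMaxSome (t : List (List Char)) : ∀ b : List Char,
    PySem.List.max? (b :: t) (fun s => s.count '0')
      = some (t.foldl (fun m x => if pvKey m < pvKey x then x else m) b) := by
  induction t with
  | nil => intro b; simp [PySem.List.max?]
  | cons x t ih =>
    intro b
    have hstep : PySem.List.max? (b :: x :: t) (fun s => s.count '0')
        = PySem.List.max? ((if pvKey b < pvKey x then x else b) :: t) (fun s => s.count '0') := by
      by_cases h : pvKey b < pvKey x <;> simp only [pvKey] at h <;> simp [PySem.List.max?, pvKey, h]
    rw [hstep, ih]
    simp only [List.foldl_cons]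


lemma pvFold_isBest (t : List (List Char)) : ∀ b : List Char,
    (b :: t).Pairwise (fun s t => pvLexLt s t = true) →
    pvIsBest (b :: t) (t.foldl (fun m x => if pvKey m < pvKey x then x else m) b) := by
  induction t with
  | nil => intro b _; exact ⟨List.mem_singleton_self b, by intro x hx; simp at hx; left; simp [hx]⟩
  | cons x t ih =>
    intro b hp
    simp only [List.foldl_cons]
    have hcover : ∀ b' : List Char, b' = b ∨ b' = x →
        (b' :: t).Pairwise (fun s t => pvLexLt s t = true) →
        pvBetter ((b'.count '0' : Int), b') ((b.count '0' : Int), b) = true ∨ b' = b →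
        pvBetter ((b'.count '0' : Int), b') ((x.count '0' : Int), x) = true ∨ b' = x →
        pvIsBest (b :: x :: t) (t.foldl (fun m x => if pvKey m < pvKey x then x else m) b') := by
      intro b' hmem hp' hcb hcx
      obtain ⟨hm, hb⟩ := ih b' hp'
      refine ⟨?_, ?_⟩
      · rcases List.mem_cons.mp hm with h1 | h1
        · rcases hmem with h2 | h2 <;> rw [h1, h2] <;> simp
        · exact List.mem_cons_of_mem b (List.mem_cons_of_mem x h1)
      · intro y hy
        set m := t.foldl (fun m x => if pvKey m < pvKey x then x else m) b' with hmdef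
        have hmb' : m = b' ∨ pvBetter ((m.count '0' : Int), m) ((b'.count '0' : Int), b') = true := by
          rcases hb b' List.mem_cons_self with h1 | h1
          · left; exact h1.symm ▸ rfl
          · right; exact h1
        have step : ∀ z : List Char,
            (pvBetter ((b'.count '0' : Int), b') ((z.count '0' : Int), z) = true ∨ b' = z) →
            z = m ∨ pvBetter ((m.count '0' : Int), m) ((z.count '0' : Int), z) = true := by
          intro z hz
          rcases hz with hz | hz
          · rcases hmb' with h1 | h1
            · right; rw [h1]; exact hz
            · right; exact pvBetter_trans h1 hz
          · subst hz
            rcases hmb' with h1 | h1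
            · left; exact h1.symm
            · right; exact h1
        rcases List.mem_cons.mp hy with h1 | h1
        · subst h1; exact step y hcb
        · rcases List.mem_cons.mp h1 with h2 | h2
          · subst h2; exact step y hcx
          · exact hb y (List.mem_cons_of_mem b' h2)
    by_cases h : pvKey b < pvKey x
    · simp only [if_pos h]
      refine hcover x (Or.inr rfl) hp.tail ?_ (Or.inr rfl)
      left; simp only [pvBetter, pvKey] at h ⊢
      simp only [Bool.or_eq_true, decide_eq_true_eq, gt_iff_lt]
      left; exact_mod_cast h
    · simp only [if_neg h]
      have hp' : (b :: t).Pairwise (fun s t => pvLexLt s t = true) := by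
        have h1 := List.pairwise_cons.mp hp
        have h2 := List.pairwise_cons.mp h1.2
        exact List.pairwise_cons.mpr ⟨fun y hy => h1.1 y (List.mem_cons_of_mem x hy), h2.2⟩
      refine hcover b (Or.inl rfl) hp' (Or.inr rfl) ?_
      left
      rcases Nat.lt_or_ge (pvKey x) (pvKey b) with hlt | hge
      · simp only [pvBetter, pvKey] at hlt ⊢
        simp only [Bool.or_eq_true, decide_eq_true_eq, gt_iff_lt]
        left; exact_mod_cast hlt
      · have heq : pvKey b = pvKey x := by simp only [pvKey] at h hge ⊢; omega
        have hlex : pvLexLt b x = true := (List.pairwise_cons.mp hp).1 x List.mem_cons_self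
        simp only [pvKey] at heq
        simp [pvBetter, heq, hlex]


lemma pvMax_isBest {l : List (List Char)} (hp : l.Pairwise (fun s t => pvLexLt s t = true))
    {m : List Char} (h : PySem.List.max? l (fun s => s.count '0') = some m) : pvIsBest l m := by
  cases l with
  | nil => simp [PySem.List.max?] at h
  | cons b t =>
    rw [pvMaxSome t b] at h
    have h2 := pvFold_isBest t b hp
    rw [Option.some_inj.mp h] at h2
    exact h2


lemma pvFoldRelax_get? (C : List (Int × (Int × List Char))) :
    ∀ (d : PySem.Dict Int (Int × List Char)) (v : Int),
    ((C.foldl pvRelax d).get? v) = pvBestFrom (d.get? v) ((C.filter (·.1 == v)).map (·.2)) := by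
  induction C with
  | nil => intro d v; rfl
  | cons p C ih =>
    obtain ⟨k, pr⟩ := p
    intro d v
    rw [List.foldl_cons, ih]
    by_cases hv : k = v
    · subst hv
      have hfil : (((k, pr) :: C).filter (·.1 == k)).map (·.2)
          = pr :: (C.filter (·.1 == k)).map (·.2) := by simp
      rw [hfil]
      have hget : (pvRelax d (k, pr)).get? k = (match d.get? k with
          | none => some pr
          | some q => if pvBetter pr q then some pr else some q) := by
        unfold pvRelax
        rcases hd : d.get? k with _ | cur
        · simp [PySem.Dict.get?_insert_self]
        · by_cases hb : pvBetter pr cur = true <;>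
            simp [hd, hb, PySem.Dict.get?_insert_self]
      rw [hget]
      rcases d.get? k with _ | q
      · rfl
      · by_cases hb : pvBetter pr q = true <;> simp [hb, pvBestFrom]
    · have hfil : (((k, pr) :: C).filter (·.1 == v)).map (·.2)
          = (C.filter (·.1 == v)).map (·.2) := by simp [hv]
      rw [hfil]
      have hget : (pvRelax d (k, pr)).get? v = d.get? v := by
        unfold pvRelax
        rcases hd : d.get? k with _ | cur
        · simp [PySem.Dict.get?_insert_of_ne d pr (fun h => hv h.symm)]
        · by_cases hb : pvBetter pr cur = true <;>
            simp [hb, PySem.Dict.get?_insert_of_ne d pr (fun h => hv h.symm)]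
      rw [hget]


lemma pvFoldRelax_nodup (C : List (Int × (Int × List Char))) :
    ∀ (d : PySem.Dict Int (Int × List Char)), d.keys.Nodup → (C.foldl pvRelax d).keys.Nodup := by
  induction C with
  | nil => intro d h; exact h
  | cons p C ih =>
    intro d h
    rw [List.foldl_cons]
    apply ih
    unfold pvRelax
    rcases hd : d.get? p.1 with _ | cur
    · simpa using PySem.Dict.nodup_keys_insert d p.1 p.2 h
    · by_cases hb : pvBetter p.2 cur = true <;>
        simp [hb, h, PySem.Dict.nodup_keys_insert d p.1 p.2 h]


lemma pvBestFrom_some (l : List (Int × List Char)) : ∀ q : Int × List Char,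
    ∃ m, pvBestFrom (some q) l = some m ∧ (m = q ∨ m ∈ l) ∧
      (q = m ∨ pvBetter m q = true) ∧ ∀ p ∈ l, p = m ∨ pvBetter m p = true := by
  induction l with
  | nil => intro q; exact ⟨q, rfl, Or.inl rfl, Or.inl rfl, by simp⟩
  | cons p l ih =>
    intro q
    have hstep : pvBestFrom (some q) (p :: l)
        = pvBestFrom (some (if pvBetter p q then p else q)) l := by
      by_cases hb : pvBetter p q = true <;> simp [pvBestFrom, hb]
    obtain ⟨m, hm, hmem, hq', hall⟩ := ih (if pvBetter p q then p else q)
    have hchain : ∀ z w : Int × List Char, (z = m ∨ pvBetter m z = true) →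
        (pvBetter z w = true ∨ w = z) → w = m ∨ pvBetter m w = true := by
      intro z w h1 h2
      rcases h2 with h2 | h2
      · rcases h1 with h1 | h1
        · right; rw [← h1]; exact h2
        · right; exact pvBetter_trans h1 h2
      · subst h2
        rcases h1 with h1 | h1
        · left; exact h1
        · right; exact h1
    by_cases hb : pvBetter p q = true
    · rw [if_pos hb] at hm hmem hq'
      rw [hstep, if_pos hb]
      refine ⟨m, hm, ?_, ?_, ?_⟩
      · rcases hmem with h1 | h1
        · right; rw [h1]; exact List.mem_cons_self
        · right; exact List.mem_cons_of_mem p h1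
      · right
        rcases hq' with h1 | h1
        · rw [h1] at hb; exact hb
        · exact pvBetter_trans h1 hb
      · intro r hr
        rcases List.mem_cons.mp hr with rfl | hr'
        · exact hq'
        · exact hall r hr'
    · rw [if_neg hb] at hm hmem hq'
      rw [hstep, if_neg hb]
      refine ⟨m, hm, ?_, hq', ?_⟩
      · rcases hmem with h1 | h1
        · left; exact h1
        · right; exact List.mem_cons_of_mem p h1
      · intro r hr
        rcases List.mem_cons.mp hr with rfl | hr'
        · rcases pvBetter_trichotomy r q with h1 | h1 | h1
          · exact absurd h1 hb
          · exact hchain q r hq' (Or.inl h1)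
          · rw [h1]; exact hq'
        · exact hall r hr'


lemma pvBestFrom_spec {l : List (Int × List Char)} {m : Int × List Char}
    (h : pvBestFrom none l = some m) :
    m ∈ l ∧ ∀ p ∈ l, p = m ∨ pvBetter m p = true := by
  cases l with
  | nil => simp [pvBestFrom] at h
  | cons p l =>
    have hstep : pvBestFrom none (p :: l) = pvBestFrom (some p) l := rfl
    rw [hstep] at h
    obtain ⟨m', hm', hmem, hq', hall⟩ := pvBestFrom_some l p
    rw [hm'] at h
    obtain rfl := Option.some_inj.mp h
    refine ⟨?_, ?_⟩
    · rcases hmem with h1 | h1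
      · rw [h1]; exact List.mem_cons_self
      · exact List.mem_cons_of_mem p h1
    · intro r hr
      rcases List.mem_cons.mp hr with rfl | hr'
      · exact hq'
      · exact hall r hr'


lemma pvBestFrom_none {l : List (Int × List Char)} (h : pvBestFrom none l = none) : l = [] := by
  cases l with
  | nil => rfl
  | cons p l =>
    exfalso
    have hstep : pvBestFrom none (p :: l) = pvBestFrom (some p) l := rfl
    rw [hstep] at h
    obtain ⟨m', hm', -, -, -⟩ := pvBestFrom_some l p
    rw [hm'] at h
    cases h


lemma pvStep_eq (d : PySem.Dict Int (Int × List Char)) :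
    pvStep d = (d.items.flatMap pvCands).foldl pvRelax PySem.Dict.empty := by
  unfold pvStep pvCands
  rw [List.foldl_flatMap]
  simp only [List.foldl_map]


lemma pvMem_filt {v : Int} {i : Nat} {x : List Char} :
    x ∈ pvFilt v i ↔ x ∈ pvCombos i ∧ pvEval x = v := by
  simp [pvFilt, List.mem_filter]


lemma pvBetter_append {zs zt : Int} {s t : List Char} (h : s.length = t.length) (c : Char) (δ : Int) :
    pvBetter (zs + δ, s ++ [c]) (zt + δ, t ++ [c]) = pvBetter (zs, s) (zt, t) := by
  simp only [pvBetter, pvLexLt_append s t c c h, lt_irrefl, decide_false, Bool.and_false,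
    Bool.or_false, gt_iff_lt]
  have h1 : decide (zt + δ < zs + δ) = decide (zt < zs) := by
    rw [Bool.eq_iff_iff]; simp only [decide_eq_true_eq]; omega
  have h2 : (zs + δ == zt + δ) = (zs == zt) := by
    rw [Bool.eq_iff_iff]; simp only [beq_iff_eq]; omega
  rw [h1, h2]


lemma pvCandKey_congr {s t : List Char} (k : Int) (c : Char) (h : s.length = t.length) :
    pvCandKey k s c = pvCandKey k t c := by simp [pvCandKey, h]


lemma pvCount_append (s : List Char) (c : Char) :
    ((s ++ [c]).count '0' : Int) = (s.count '0' : Int) + (if c = '0' then 1 else 0) := by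
  by_cases hc0 : c = '0' <;> simp [List.count_append, hc0]


lemma pvCands_eq (k z : Int) (s : List Char) :
    pvCands (k, (z, s)) = (['0', '1', '2'] : List Char).map
      (fun c => (pvCandKey k s c, (z + (if c = '0' then 1 else 0), s ++ [c]))) := by
  simp [pvCands, pvCandKey]


lemma pvEval_candKey (s : List Char) (c : Char) :
    pvEval (s ++ [c]) = pvCandKey (pvEval s) s c := by
  rw [pvEval_append]
  simp [pvEvalStep, pvCandKey]


lemma pvMem_candL {d : PySem.Dict Int (Int × List Char)} {v : Int} {q : Int × List Char} :
    q ∈ ((d.items.flatMap pvCands).filter (·.1 == v)).map (·.2) ↔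
      ∃ k z s, (k, (z, s)) ∈ d.items ∧ ∃ c ∈ (['0', '1', '2'] : List Char),
        pvCandKey k s c = v ∧ q = (z + (if c = '0' then 1 else 0), s ++ [c]) := by
  constructor
  · intro hq
    simp only [List.mem_map, List.mem_filter, List.mem_flatMap] at hq
    obtain ⟨⟨kk, pr⟩, ⟨⟨⟨k, ⟨z, s⟩⟩, hitem, hcand⟩, hkv⟩, rfl⟩ := hq
    rw [pvCands_eq] at hcand
    simp only [List.mem_map] at hcand
    obtain ⟨c, hc, heq⟩ := hcand
    obtain ⟨h1, h2⟩ := Prod.mk.injEq .. ▸ heq.symm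
    refine ⟨k, z, s, hitem, c, hc, ?_, ?_⟩
    · simp only [beq_iff_eq] at hkv
      rw [← hkv]; exact h1.symm ▸ rfl
    · exact h2.symm ▸ rfl
  · rintro ⟨k, z, s, hitem, c, hc, hkey, rfl⟩
    simp only [List.mem_map, List.mem_filter, List.mem_flatMap]
    refine ⟨(pvCandKey k s c, (z + (if c = '0' then 1 else 0), s ++ [c])), ⟨⟨(k, (z, s)), hitem, ?_⟩, by simp [hkey]⟩, rfl⟩
    rw [pvCands_eq]
    simp only [List.mem_map]
    exact ⟨c, hc, rfl⟩


lemma pvStep_ok {i : Nat} {d : PySem.Dict Int (Int × List Char)} (h : pvDictOK i d) :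
    pvDictOK (i + 1) (pvStep d) := by
  obtain ⟨hnd, hinv⟩ := h
  have hitem : ∀ k z s, (k, (z, s)) ∈ d.items →
      z = (s.count '0' : Int) ∧ s ∈ pvCombos i ∧ pvEval s = k := by
    intro k z s hm
    have hg := PySem.Dict.get?_of_mem_items d hm hnd
    have h2 := hinv k
    rw [hg] at h2
    obtain ⟨hz, hbest⟩ := h2
    have h3 := pvMem_filt.mp hbest.1
    exact ⟨hz, h3.1, h3.2⟩
  have hcomplete : ∀ t ∈ pvCombos i, ∃ z' m', (pvEval t, (z', m')) ∈ d.items ∧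
      z' = (m'.count '0' : Int) ∧ pvIsBest (pvFilt (pvEval t) i) m' := by
    intro t ht
    have h2 := hinv (pvEval t)
    rcases hg : d.get? (pvEval t) with _ | ⟨z', m'⟩
    · rw [hg] at h2
      exfalso
      have : t ∈ pvFilt (pvEval t) i := pvMem_filt.mpr ⟨ht, rfl⟩
      rw [h2] at this
      exact absurd this (List.not_mem_nil)
    · rw [hg] at h2
      exact ⟨z', m', PySem.Dict.mem_items_of_get?_eq_some d hg, h2.1, h2.2⟩
  constructor
  · rw [pvStep_eq]
    exact pvFoldRelax_nodup _ _ (by simp [PySem.Dict.keys_empty])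
  · intro v
    rw [pvStep_eq, pvFoldRelax_get? _ _ v, PySem.Dict.get?_empty]
    rcases hb : pvBestFrom none (((d.items.flatMap pvCands).filter (·.1 == v)).map (·.2))
      with _ | ⟨z, m⟩
    · -- no candidate with key v: the (i+1)-level class of v is empty
      rw [hb]
      show pvFilt v (i + 1) = []
      have hLnil := pvBestFrom_none hb
      by_contra hne
      rcases List.exists_mem_of_ne_nil _ hne with ⟨x, hx⟩
      obtain ⟨hxc, hxe⟩ := pvMem_filt.mp hx
      obtain ⟨t, ht, c, hc, rfl⟩ := pvCombos_mem_succ.mp hxc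
      obtain ⟨z', m', hmem, hz', hbest⟩ := hcomplete t ht
      have hlenm : m'.length = i := pvCombos_length (pvMem_filt.mp hbest.1).1
      have hlent : t.length = i := pvCombos_length ht
      have hkey : pvCandKey (pvEval t) m' c = v := by
        rw [pvCandKey_congr (pvEval t) c (hlenm.trans hlent.symm), ← pvEval_candKey, hxe]
      have hmemL := pvMem_candL.mpr ⟨pvEval t, z', m', hmem, c, hc, hkey, rfl⟩
      rw [hLnil] at hmemL
      exact absurd hmemL (List.not_mem_nil)
    · -- best candidate (z, m): it is the best of the (i+1)-level class of v
      rw [hb]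
      show z = (m.count '0' : Int) ∧ pvIsBest (pvFilt v (i + 1)) m
      obtain ⟨hmemL, hallL⟩ := pvBestFrom_spec hb
      obtain ⟨k, z0, s0, hit, c, hc, hkey, heq⟩ := pvMem_candL.mp hmemL
      obtain ⟨hz0, hs0c, hs0e⟩ := hitem k z0 s0 hit
      obtain ⟨hz, hm⟩ : z = z0 + (if c = '0' then 1 else 0) ∧ m = s0 ++ [c] := by
        constructor <;> [exact congrArg Prod.fst heq; exact congrArg Prod.snd heq]
      have hzc : z = (m.count '0' : Int) := by
        rw [hz, hm, pvCount_append, hz0]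
      refine ⟨hzc, ?_, ?_⟩
      · -- m ∈ pvFilt v (i+1)
        refine pvMem_filt.mpr ⟨?_, ?_⟩
        · exact hm ▸ pvCombos_mem_succ.mpr ⟨s0, hs0c, c, hc, rfl⟩
        · rw [hm, pvEval_candKey, hs0e, ← hkey]
      · -- every member of the class is m or beaten by m
        intro x hx
        obtain ⟨hxc, hxe⟩ := pvMem_filt.mp hx
        obtain ⟨t, ht, c', hc', rfl⟩ := pvCombos_mem_succ.mp hxc
        obtain ⟨z', m', hmem', hz'', hbest'⟩ := hcomplete t ht
        have hlenm : m'.length = i := pvCombos_length (pvMem_filt.mp hbest'.1).1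
        have hlent : t.length = i := pvCombos_length ht
        have hkey' : pvCandKey (pvEval t) m' c' = v := by
          rw [pvCandKey_congr (pvEval t) c' (hlenm.trans hlent.symm), ← pvEval_candKey, hxe]
        have hyL := pvMem_candL.mpr ⟨pvEval t, z', m', hmem', c', hc', hkey', rfl⟩
        have chain1 := hallL _ hyL
        -- y vs x
        have chain2 : (((t ++ [c']).count '0' : Int), t ++ [c'])
              = (z' + (if c' = '0' then 1 else 0), m' ++ [c'])
            ∨ pvBetter (z' + (if c' = '0' then 1 else 0), m' ++ [c'])
                (((t ++ [c']).count '0' : Int), t ++ [c']) = true := by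
          rcases hbest'.2 t (pvMem_filt.mpr ⟨ht, rfl⟩) with h1 | h1
          · left
            rw [h1, pvCount_append, hz'']
          · right
            have := pvBetter_append (zs := z') (zt := (t.count '0' : Int))
              (s := m') (t := t) (hlenm.trans hlent.symm) c' (if c' = '0' then 1 else 0)
            rw [pvCount_append]
            rw [this]
            rw [hz'']
            exact hz'' ▸ h1
        -- combine
        rcases chain1 with h1 | h1
        · rcases chain2 with h2 | h2
          · left
            have h3 := h2.trans h1
            exact congrArg Prod.snd h3
          · right
            rw [← hzc, ← h1]
            exact h2
        · rcases chain2 with h2 | h2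
          · right
            rw [← hzc]
            have : pvBetter (z, m) (((t ++ [c']).count '0' : Int), t ++ [c']) = true := by
              rw [h2]; exact h1
            exact this
          · right
            rw [← hzc]
            exact pvBetter_trans h1 h2


lemma pvLoop_eq (num : Int) (fuel : Nat) :
    ∀ (i : Nat) (d : PySem.Dict Int (Int × List Char)), pvDictOK i d →
      pvLoopB num d fuel = PySem.List.max? (pvLoopA num (i + 1) fuel) (fun s => s.count '0') := by
  induction fuel with
  | zero => intro i d _; simp [pvLoopB, pvLoopA, PySem.List.max?]
  | succ fuel ih =>
    intro i d hOK
    have hOK' := pvStep_ok hOK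
    have hinv := hOK'.2 num
    rw [pvLoopB, pvLoopA]
    by_cases hemp : ((pvCombos (i + 1)).filter (fun s => pvEval s == num)).isEmpty
    · have hnil : pvFilt num (i + 1) = [] := by
        rwa [List.isEmpty_iff] at hemp
      have hget : (pvStep d).get? num = none := by
        rcases hg : (pvStep d).get? num with _ | ⟨z, m⟩
        · rfl
        · rw [hg] at hinv
          exfalso
          have := hinv.2.1
          rw [hnil] at this
          exact absurd this (List.not_mem_nil)
      rw [hget, if_pos hemp]
      exact ih (i + 1) (pvStep d) hOK'
    · have hnil : pvFilt num (i + 1) ≠ [] := by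
        rwa [Ne, ← List.isEmpty_iff]
      rcases hg : (pvStep d).get? num with _ | ⟨z, m⟩
      · rw [hg] at hinv
        exact absurd hinv hnil
      · rw [hg] at hinv
        rw [if_neg hemp]
        rcases hmax : PySem.List.max? ((pvCombos (i + 1)).filter (fun s => pvEval s == num))
            (fun s => s.count '0') with _ | m0
        · exfalso
          exact hnil ((PySem.List.max?_eq_none_iff _ _).mp hmax)
        · have hpw := (pvCombos_pairwise (i + 1)).filter (fun s => pvEval s == num)
          have hbest0 := pvMax_isBest hpw hmax
          have : m0 = m := pvIsBest_unique hbest0 hinv.2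
          rw [this]


lemma pvInit_get? (v : Int) : (PySem.Dict.ofList [((0 : Int), ((0 : Int), ([] : List Char)))]).get? v
    = if (0 : Int) = v then some (0, []) else none := by
  by_cases hv : (0 : Int) = v <;> simp [PySem.Dict.ofList, PySem.Dict.empty, PySem.Dict.update,
    PySem.Dict.insert, PySem.Dict.get?, hv]


lemma pvInit_ok : pvDictOK 0 (PySem.Dict.ofList [(0, (0, []))]) := by
  constructor
  · show (PySem.Dict.ofList [((0 : Int), ((0 : Int), ([] : List Char)))]).keys.Nodup
    decide
  · intro v
    rw [pvInit_get? v]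
    by_cases hv : (0 : Int) = v
    · rw [if_pos hv]
      refine ⟨by simp, ?_, ?_⟩
      · refine pvMem_filt.mpr ⟨by simp [pvCombos], ?_⟩
        rw [← hv]; rfl
      · intro x hx
        have := pvMem_filt.mp hx
        have hx0 : x = [] := by simpa [pvCombos] using this.1
        left; exact hx0
    · rw [if_neg hv]
      show pvFilt v 0 = []
      have : pvEval [] = 0 := rfl
      simp [pvFilt, pvCombos, this]
      intro hc; exact absurd hc hv


-- ===== VERDICT (by name: the statement is the Claim_ definition above) =====
theorem decimal_to_nos_spec : Claim_equal_decimal_to_nos := by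
  intro num _
  unfold Spec_decimal_to_nos decimal_to_nos decimal_to_nos_alt
  rw [pvLoop_eq num (num.natAbs + 1) 0 _ pvInit_ok]
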